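-- pv_equiv track=rewrite | github.com/aldo-gutierrez/bitmasksorterPython | main.py | partition_stable
-- ===== SOURCE A (Python) =====
-- def array_copy(src: list[int], src_pos: int, dest: list[int], dest_pos: int, length: int):
--     dest[dest_pos:dest_pos + length] = src[src_pos:src_pos + length]
--
-- def partition_stable(array: list[int], start: int, end_p1: int, mask: int, aux: list[int]) -> int:
--     left: int = start
--     right: int = 0
--     for i in range(start, end_p1):
--         element: int = array[i]
--         if (element & mask) == 0:
--             array[left] = element
--             left += 1
--         else:
--             aux[right] = element
--             right += 1
--
--     array_copy(aux, 0, array, left, right)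
--     return left
-- ===== SOURCE B (Python) =====
-- def partition_stable(array: list[int], start: int, end_p1: int, mask: int, aux: list[int]) -> int:
--     # Divide-and-conquer stable partition by rotation; no auxiliary buffer needed
--     # (aux is left untouched; the return value matches A's). Mutates array in place.
--     def part(lo: int, hi: int) -> int:
--         if hi - lo < 1:
--             return lo
--         if hi - lo == 1:
--             return lo + (1 if (array[lo] & mask) == 0 else 0)
--         mid = (lo + hi) // 2
--         m1 = part(lo, mid)
--         m2 = part(mid, hi)
--         # rotate the ones of the left half past the zeros of the right half
--         array[m1:m2] = array[mid:m2] + array[m1:mid]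
--         return m1 + (m2 - mid)
--     return part(start, end_p1)
-- ===== Notes on version B (the rewrite author's own statement) =====
-- stated objective: alternative
-- what changed: A's single linear pass with left/right cursors and an auxiliary buffer is replaced by a recursive divide-and-conquer stable partition: partition each half, then rotate the left half's ones past the right half's zeros with one slice assignment, needing no auxiliary buffer at all.
-- outside the precondition, e.g. on partition_stable([1, 2, 3], -3, 3, 1, [0, 0, 0]): A returns 1, B returns -1
import Mathlib
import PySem

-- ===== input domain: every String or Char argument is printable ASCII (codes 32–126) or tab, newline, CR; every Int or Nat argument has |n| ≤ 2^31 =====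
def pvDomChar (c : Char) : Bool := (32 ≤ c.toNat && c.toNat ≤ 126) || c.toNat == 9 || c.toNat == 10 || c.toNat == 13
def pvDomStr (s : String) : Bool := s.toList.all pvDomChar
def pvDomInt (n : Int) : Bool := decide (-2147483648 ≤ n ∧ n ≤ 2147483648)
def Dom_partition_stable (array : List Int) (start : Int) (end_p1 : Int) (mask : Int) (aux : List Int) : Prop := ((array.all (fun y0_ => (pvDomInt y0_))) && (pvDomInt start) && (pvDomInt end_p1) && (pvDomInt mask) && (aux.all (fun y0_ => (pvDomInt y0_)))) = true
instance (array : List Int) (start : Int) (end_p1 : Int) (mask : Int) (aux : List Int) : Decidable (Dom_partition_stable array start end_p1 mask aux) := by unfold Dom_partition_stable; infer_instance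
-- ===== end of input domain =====

-- B replaces A's single cursor-pass with an auxiliary buffer by a recursive divide-and-conquer
-- stable partition (partition both halves, rotate the middle), which needs no auxiliary buffer
-- (objective: alternative). Both mutate array identically inside Pre_, but B never touches aux
-- (A fills aux[0:ones] as scratch); the equivalence proved here is about the RETURN value.

-- ===== PORT A =====
-- the for-loop of A: state (array, aux, left, right), one step per index of range(start, end_p1)
def pvLoopA (mask : Int) : List Int → List Int → List Int → Int → Int → (List Int × List Int × Int × Int)
  | [], arr, aux, left, right => (arr, aux, left, right)
  | i :: rest, arr, aux, left, right =>
    let element := PySem.List.pyGetD arr i 0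
    if (PySem.Int.band element mask) == 0 then
      pvLoopA mask rest (PySem.List.pySetD arr left element) aux (left + 1) right
    else
      pvLoopA mask rest arr (PySem.List.pySetD aux right element) left (right + 1)

def partition_stable (array : List Int) (start : Int) (end_p1 : Int) (mask : Int) (aux : List Int) : Int :=
  let st := pvLoopA mask (PySem.List.pyRange start end_p1 1) array aux start 0
  -- array_copy(aux, 0, array, left, right) only mutates array; the function returns left
  st.2.2.1

-- ===== PORT B =====
-- Python's list slice assignment xs[a:b] = r (exact: both bounds wrap/clamp via clampIdx,
-- and the removed range is [a', max a' b'))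
def pvSetSlice (xs : List Int) (a b : Int) (r : List Int) : List Int :=
  let a' := PySem.List.clampIdx xs.length a
  let b' := PySem.List.clampIdx xs.length b
  xs.take a' ++ r ++ xs.drop (max a' b')

-- the inner recursive function part(lo, hi) of B; its state is the array it rearranges.
-- array[lo] is ported with pyGetD (exact for the in-range indices Pre_ admits, like A's port).
def pvPartB (mask : Int) (arr : List Int) (lo hi : Int) : List Int × Int :=
  if hi - lo < 1 then (arr, lo)
  else if hi - lo = 1 then
    if (PySem.Int.band (PySem.List.pyGetD arr lo 0) mask) == 0 then (arr, lo + 1) else (arr, lo)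
  else
    let mid := PySem.Int.floordiv (lo + hi) 2
    let r1 := pvPartB mask arr lo mid
    let r2 := pvPartB mask r1.1 mid hi
    let arr3 := pvSetSlice r2.1 r1.2 r2.2
      (PySem.List.slice r2.1 (some mid) (some r2.2) ++ PySem.List.slice r2.1 (some r1.2) (some mid))
    (arr3, r1.2 + (r2.2 - mid))
termination_by (hi - lo).toNat
decreasing_by
  · have h2 := PySem.Int.floordiv_eq_ediv_of_pos (a := lo + hi) (b := 2) (by norm_num)
    omega
  · have h2 := PySem.Int.floordiv_eq_ediv_of_pos (a := lo + hi) (b := 2) (by norm_num)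
    omega

def partition_stable_alt (array : List Int) (start : Int) (end_p1 : Int) (mask : Int) (aux : List Int) : Int :=
  (pvPartB mask array start end_p1).2

-- ===== PRECONDITION & SPEC =====
-- Pre_ excludes inputs where the Python A raises IndexError (end_p1 beyond the array on a
-- non-empty range, or aux shorter than the number of masked elements) and non-empty ranges
-- with a negative start, on which A returns via Python's negative-index wraparound — an
-- accident of element-wise indexing that B's recursion splits differently.
def Pre_partition_stable (array : List Int) (start : Int) (end_p1 : Int) (mask : Int) (aux : List Int) : Prop :=
  end_p1 ≤ start ∨
  (0 ≤ start ∧ end_p1 ≤ (array.length : Int) ∧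
    (((PySem.List.slice array (some start) (some end_p1)).filter
        (fun x => !((PySem.Int.band x mask) == 0))).length : Int) ≤ (aux.length : Int))
instance (array : List Int) (start : Int) (end_p1 : Int) (mask : Int) (aux : List Int) : Decidable (Pre_partition_stable array start end_p1 mask aux) := by unfold Pre_partition_stable; infer_instance

def pvWitness_partition_stable : List Int × Int × Int × Int × List Int := ([5, 2, 3], 0, 3, 1, [0, 0])

def Spec_partition_stable (array : List Int) (start : Int) (end_p1 : Int) (mask : Int) (aux : List Int) (out : Int) : Prop := out = partition_stable_alt array start end_p1 mask aux
instance (array : List Int) (start : Int) (end_p1 : Int) (mask : Int) (aux : List Int) (out : Int) : Decidable (Spec_partition_stable array start end_p1 mask aux out) := by unfold Spec_partition_stable; infer_instance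

-- ===== CLAIM (what is proved, stated in full; the proofs are below) =====
def Claim_equal_partition_stable : Prop := ∀ (array : List Int) (start : Int) (end_p1 : Int) (mask : Int) (aux : List Int), Dom_partition_stable array start end_p1 mask aux → Pre_partition_stable array start end_p1 mask aux → Spec_partition_stable array start end_p1 mask aux (partition_stable array start end_p1 mask aux)

-- ===== LEMMAS AND PROOFS =====

-- clampIdx on an in-range nonnegative index is toNat
lemma pvClamp (n : Nat) (k : Int) (h0 : 0 ≤ k) (h : k ≤ (n : Int)) :
    PySem.List.clampIdx n k = k.toNat := by
  unfold PySem.List.clampIdx; split_ifs <;> omega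

-- loop invariant for A: with left ≤ i and the window in bounds, the final left equals
-- left plus the number of mask-zero elements among the next n entries of arr
lemma pvLoopA_left (mask : Int) : ∀ (n : Nat) (i left right : Int) (arr aux : List Int),
    0 ≤ left → left ≤ i → i + n ≤ (arr.length : Int) →
    (pvLoopA mask (PySem.List.pyRange i (i + n) 1) arr aux left right).2.2.1
      = left + (((arr.drop i.toNat).take n).filter (fun x => (PySem.Int.band x mask) == 0)).length := by
  intro n
  induction n with
  | zero =>
    intro i left right arr aux _ _ _
    simp [pvLoopA]
  | succ n ih =>
    intro i left right arr aux hl0 hli hlen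
    have hi0 : 0 ≤ i := le_trans hl0 hli
    have hilt : i < i + (n + 1 : Nat) := by push_cast; omega
    have hidx : i.toNat < arr.length := by omega
    rw [PySem.List.pyRange_one_cons hilt]
    have hget : PySem.List.pyGetD arr i 0 = arr[i.toNat] :=
      PySem.List.pyGetD_eq_getElem arr 0 hi0 (by omega)
    have hdrop : arr.drop i.toNat = arr[i.toNat] :: arr.drop (i.toNat + 1) :=
      List.drop_eq_getElem_cons hidx
    have hsucc : (i + 1).toNat = i.toNat + 1 := by omega
    have hrange : i + (n + 1 : Nat) = (i + 1) + (n : Nat) := by push_cast; omega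
    simp only [pvLoopA, hget]
    by_cases hz : (PySem.Int.band arr[i.toNat] mask) == 0
    · -- zero branch: array[left] := element
      simp only [hz, if_true]
      have hset : PySem.List.pySetD arr left arr[i.toNat] = arr.set left.toNat arr[i.toNat] :=
        PySem.List.pySetD_of_nonneg arr arr[i.toNat] hl0
      rw [hrange, hset,
        ih (i + 1) (left + 1) right (arr.set left.toNat arr[i.toNat]) aux (by omega) (by omega)
          (by rw [List.length_set]; omega)]
      have hdropset : (arr.set left.toNat arr[i.toNat]).drop (i + 1).toNat
          = arr.drop (i + 1).toNat := List.drop_set_of_lt (by omega)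
      rw [hdropset, hsucc, hdrop, List.take_succ_cons, List.filter_cons]
      simp only [hz, if_true, List.length_cons]
      omega
    · -- ones branch: aux[right] := element
      simp only [hz, Bool.false_eq_true, if_false]
      rw [hrange,
        ih (i + 1) left (right + 1) arr (PySem.List.pySetD aux right arr[i.toNat]) hl0 (by omega)
          (by omega)]
      rw [hsucc, hdrop, List.take_succ_cons, List.filter_cons]
      simp [hz]

-- characterisation of B's recursion: on the decomposition p ++ w ++ s with lo = |p|,
-- hi = |p| + |w|, part returns the stably partitioned window and lo + #zeros
lemma pvPartB_key (mask : Int) : ∀ (n : Nat) (p w s : List Int), w.length = n →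
    pvPartB mask (p ++ w ++ s) (p.length : Int) ((p.length : Int) + (w.length : Int)) =
      (p ++ w.filter (fun x => (PySem.Int.band x mask) == 0)
         ++ w.filter (fun x => !((PySem.Int.band x mask) == 0)) ++ s,
       (p.length : Int) + ((w.filter (fun x => (PySem.Int.band x mask) == 0)).length : Int)) := by
  intro n
  induction n using Nat.strong_induction_on with
  | _ n ih =>
  intro p w s hn
  by_cases h0 : n = 0
  · subst h0
    have hw : w = [] := List.eq_nil_of_length_eq_zero hn
    subst hw
    rw [pvPartB, if_pos (by simp)]
    simp
  by_cases h1 : n = 1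
  · subst h1
    obtain ⟨x, hw⟩ : ∃ x, w = [x] := by
      rcases w with _ | ⟨x, t⟩ <;> simp_all
    subst hw
    rw [pvPartB, if_neg (by simp), if_pos (by simp)]
    have hget : PySem.List.pyGetD (p ++ [x] ++ s) (p.length : Int) 0 = x := by
      rw [List.append_assoc, PySem.List.pyGetD_natCast]
      simp [List.getD]
    rw [hget]
    by_cases hz : (PySem.Int.band x mask) == 0
    · simp [hz, List.filter]
    · simp [hz, List.filter]
  -- n ≥ 2: recursive case
  have h2 : 2 ≤ n := by omega
  rw [pvPartB, if_neg (by omega), if_neg (by omega)]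
  have hmid : PySem.Int.floordiv ((p.length : Int) + ((p.length : Int) + (w.length : Int))) 2
      = (p.length : Int) + ((w.length / 2 : Nat) : Int) := by
    rw [PySem.Int.floordiv_eq_ediv_of_pos (by norm_num)]
    omega
  simp only [hmid]
  set k := w.length / 2 with hk
  have hk1 : 1 ≤ k := by omega
  have hkn : k < w.length := by omega
  have hl1 : (w.take k).length = k := by rw [List.length_take]; omega
  have IH1 := ih k (by omega) p (w.take k) (w.drop k ++ s) hl1
  rw [hl1] at IH1
  have e1 : p ++ w ++ s = p ++ w.take k ++ (w.drop k ++ s) := by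
    conv_lhs => rw [← List.take_append_drop k w]
    simp only [List.append_assoc]
  rw [e1, IH1]
  dsimp only
  set Z1 := List.filter (fun x => PySem.Int.band x mask == 0) (List.take k w) with hZ1
  set O1 := List.filter (fun x => !PySem.Int.band x mask == 0) (List.take k w) with hO1
  have hlZO : Z1.length + O1.length = k := by
    rw [hZ1, hO1, ← List.length_eq_length_filter_add, hl1]
  have hl3 : (p ++ Z1 ++ O1).length = p.length + k := by simp; omega
  have IH2 := ih (n - k) (by omega) (p ++ Z1 ++ O1) (w.drop k) s (by simp; omega)
  rw [show (((p ++ Z1 ++ O1).length : Nat) : Int) = (p.length : Int) + (k : Int) from by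
    rw [hl3]; push_cast; ring] at IH2
  rw [show ((p.length : Int) + (k : Int)) + (((w.drop k).length : Nat) : Int)
      = (p.length : Int) + (w.length : Int) from by rw [List.length_drop]; omega] at IH2
  have hq : p ++ Z1 ++ O1 ++ (w.drop k ++ s) = (p ++ Z1 ++ O1) ++ (w.drop k) ++ s := by
    simp only [List.append_assoc]
  rw [hq, IH2]
  dsimp only
  set Z2 := List.filter (fun x => PySem.Int.band x mask == 0) (List.drop k w) with hZ2
  set O2 := List.filter (fun x => !PySem.Int.band x mask == 0) (List.drop k w) with hO2
  have hlZO2 : Z2.length + O2.length = w.length - k := by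
    rw [hZ2, hO2, ← List.length_eq_length_filter_add, List.length_drop]
  have hfZ : w.filter (fun x => PySem.Int.band x mask == 0) = Z1 ++ Z2 := by
    conv_lhs => rw [← List.take_append_drop k w]
    rw [List.filter_append]
  have hfO : w.filter (fun x => !PySem.Int.band x mask == 0) = O1 ++ O2 := by
    conv_lhs => rw [← List.take_append_drop k w]
    rw [List.filter_append]
  set A2 := (p ++ Z1 ++ O1) ++ Z2 ++ O2 ++ s with hA2
  have hlenA2 : A2.length = p.length + k + (w.length - k) + s.length := by
    simp [hA2]; omega
  have hslice1 : PySem.List.slice A2 (some ((p.length : Int) + (k : Int)))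
      (some (((p.length : Int) + (k : Int)) + ((Z2.length : Nat) : Int))) = Z2 := by
    rw [PySem.List.slice_toNat A2 (by positivity) (by positivity)]
    rw [show (((p.length : Int) + (k : Int)) + ((Z2.length : Nat) : Int)).toNat
        = (p.length + k) + Z2.length from by omega,
      show ((p.length : Int) + (k : Int)).toNat = p.length + k from by omega]
    rw [show A2 = (p ++ Z1 ++ O1) ++ (Z2 ++ (O2 ++ s)) from by simp [hA2, List.append_assoc]]
    rw [List.drop_left' hl3, Nat.add_sub_cancel_left, List.take_left' rfl]
  have hslice2 : PySem.List.slice A2 (some ((p.length : Int) + ((Z1.length : Nat) : Int)))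
      (some ((p.length : Int) + (k : Int))) = O1 := by
    rw [PySem.List.slice_toNat A2 (by positivity) (by positivity)]
    rw [show ((p.length : Int) + ((Z1.length : Nat) : Int)).toNat = p.length + Z1.length from by
        omega,
      show ((p.length : Int) + (k : Int)).toNat = p.length + k from by omega]
    rw [show A2 = (p ++ Z1) ++ (O1 ++ (Z2 ++ (O2 ++ s))) from by simp [hA2, List.append_assoc]]
    rw [List.drop_left' (by simp), show p.length + k - (p.length + Z1.length) = O1.length from by
        omega,
      List.take_left' rfl]
  rw [hslice1, hslice2]
  refine Prod.ext ?_ ?_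
  · -- the rotated array (not part of the claim's return value, but of the invariant)
    simp only [pvSetSlice]
    rw [pvClamp A2.length ((p.length : Int) + ((Z1.length : Nat) : Int)) (by positivity)
        (by rw [hlenA2]; push_cast; omega),
      pvClamp A2.length (((p.length : Int) + (k : Int)) + ((Z2.length : Nat) : Int))
        (by positivity) (by rw [hlenA2]; push_cast; omega)]
    rw [show ((p.length : Int) + ((Z1.length : Nat) : Int)).toNat = p.length + Z1.length from by
        omega,
      show (((p.length : Int) + (k : Int)) + ((Z2.length : Nat) : Int)).toNat
        = p.length + k + Z2.length from by omega]
    rw [Nat.max_eq_right (by omega)]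
    rw [show A2.take (p.length + Z1.length) = p ++ Z1 from by
        rw [show A2 = (p ++ Z1) ++ (O1 ++ (Z2 ++ (O2 ++ s))) from by
            simp [hA2, List.append_assoc],
          List.take_left' (by simp)]]
    rw [show A2.drop (p.length + k + Z2.length) = O2 ++ s from by
        rw [show A2 = ((p ++ Z1 ++ O1) ++ Z2) ++ (O2 ++ s) from by
            simp [hA2, List.append_assoc],
          List.drop_left' (by simp; omega)]]
    rw [hfZ, hfO]
    simp only [List.append_assoc]
  · rw [hfZ, List.length_append]
    push_cast
    ring

theorem partition_stable_spec : Claim_equal_partition_stable := by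
  intro array start end_p1 mask aux _ hpre
  unfold Spec_partition_stable partition_stable partition_stable_alt
  by_cases hle : end_p1 ≤ start
  · have hr : PySem.List.pyRange start end_p1 1 = [] :=
      PySem.List.pyRange_one_eq_nil hle
    rw [pvPartB, if_pos (by omega)]
    simp [hr, pvLoopA]
  · rcases hpre with h | ⟨hs0, hlen, -⟩
    · omega
    · -- decompose the array around the window
      set p := array.take start.toNat with hp
      set w := (array.drop start.toNat).take (end_p1 - start).toNat with hw
      set s := array.drop end_p1.toNat with hs
      have hplen : p.length = start.toNat := by
        simp [hp]; omega
      have hwlen : w.length = (end_p1 - start).toNat := by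
        simp [hw]; omega
      have hsplit : array = p ++ w ++ s := by
        rw [hp, hw, hs, List.append_assoc]
        rw [show end_p1.toNat = start.toNat + (end_p1 - start).toNat by omega,
          ← List.drop_drop]
        rw [List.take_append_drop, List.take_append_drop]
      have key := pvPartB_key mask w.length p w s rfl
      rw [hplen, hwlen] at key
      rw [show ((start.toNat : Int)) = start from by omega] at key
      rw [show start + (((end_p1 - start).toNat : Nat) : Int) = end_p1 from by omega] at key
      rw [hsplit]
      rw [key]
      -- A's side: the loop invariant
      have hA := pvLoopA_left mask (end_p1 - start).toNat start start 0 (p ++ w ++ s) aux hs0 le_rfl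
        (by simp at hlen ⊢; omega)
      rw [show start + (((end_p1 - start).toNat : Nat) : Int) = end_p1 from by omega] at hA
      rw [hA]
      have hdt : ((p ++ w ++ s).drop start.toNat).take (end_p1 - start).toNat = w := by
        rw [List.append_assoc, List.drop_append_of_le_length (by omega),
          show start.toNat = p.length by omega]
        simp [hwlen]
      rw [hdt]
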